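-- pv_equiv track=rewrite | github.com/Y-Lou/mathematica_-Python-_- | JSproject.py | Abg
-- ===== SOURCE A (Python) =====
-- def Abg(Omega): #abg
--     a = []
--     c = list(range(Omega))
--     for i in range(Omega-1):
--         b = i
--         for k in range(Omega-1)[i:]:
--             d = k+1
--             for j in range(Omega)[d+1:]:
--                 a.extend([b,d,c[j]])
--     return a
-- ===== SOURCE B (Python) =====
-- def Abg(Omega):
--     # The flattened triples A emits are, for each pair x < y from the pool
--     # list(range(Omega)), the block x,y,z for z in pool[y+1:]. Build each block
--     # whole: repeat the template [x, y, 0] and fill every third slot with the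
--     # tail of the pool by extended-slice assignment -- no innermost loop.
--     pool = list(range(Omega))
--     out = []
--     for x in pool:
--         for y in pool[x + 1:]:
--             m = Omega - 1 - y
--             block = [x, y, 0] * m
--             block[2::3] = pool[y + 1:]
--             out += block
--     return out
-- ===== Notes on version B (the rewrite author's own statement) =====
-- stated objective: alternative
-- what changed: B drops A's innermost j-loop and its c[j] table lookups: for each pair x<y it builds the whole block by list repetition of the template [x,y,0] plus an extended-slice assignment of the pool tail into every third slot, and it iterates pair values directly from the pool instead of A's offset index arithmetic (d=k+1) over sliced range lists.
import Mathlib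
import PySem

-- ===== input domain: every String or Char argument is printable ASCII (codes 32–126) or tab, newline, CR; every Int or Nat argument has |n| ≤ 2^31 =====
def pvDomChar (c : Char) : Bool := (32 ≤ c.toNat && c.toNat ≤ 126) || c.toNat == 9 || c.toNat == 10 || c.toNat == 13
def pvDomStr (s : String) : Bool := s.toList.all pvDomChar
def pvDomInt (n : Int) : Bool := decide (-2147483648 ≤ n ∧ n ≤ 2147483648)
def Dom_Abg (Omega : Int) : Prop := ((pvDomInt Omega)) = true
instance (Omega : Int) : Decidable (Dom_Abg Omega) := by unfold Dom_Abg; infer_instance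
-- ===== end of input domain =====

-- B replaces A's innermost loop and c[j] lookups by whole-block construction (template
-- repetition + extended-slice assignment from the pool); same asymptotic cost (alternative).

-- ===== PORT A =====
-- literal transliteration of A: c = list(range(Omega)); nested loops over
-- range(Omega-1), range(Omega-1)[i:], range(Omega)[d+1:], extending a with [b,d,c[j]]
-- (c[j] never raises: j is drawn from a slice of range(Omega), so pyGetD is exact here)
def Abg (Omega : Int) : List Int :=
  let c := PySem.List.pyRange 0 Omega 1
  (PySem.List.pyRange 0 (Omega - 1) 1).foldl (fun a i =>
    let b := i
    (PySem.List.slice (PySem.List.pyRange 0 (Omega - 1) 1) (some i) none).foldl (fun a k =>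
      let d := k + 1
      (PySem.List.slice (PySem.List.pyRange 0 Omega 1) (some (d + 1)) none).foldl (fun a j =>
        a ++ [b, d, PySem.List.pyGetD c j 0]) a) a) []

-- ===== PORT B =====
-- block[2::3] = ys, ported by hand: fills every third slot starting at index 2;
-- exact here because the slice always has exactly ys.length slots (lengths match,
-- so Python's ValueError branch is unreachable in B)
def setStep3From2 : List Int → List Int → List Int
  | a :: b :: _ :: rest, v :: vs => a :: b :: v :: setStep3From2 rest vs
  | xs, _ => xs

-- pool = list(range(Omega)); for x in pool: for y in pool[x+1:]:
--   block = [x,y,0] * m;  block[2::3] = pool[y+1:];  out += block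
def Abg_alt (Omega : Int) : List Int :=
  let pool := PySem.List.pyRange 0 Omega 1
  pool.foldl (fun out x =>
    (PySem.List.slice pool (some (x + 1)) none).foldl (fun out y =>
      let m := Omega - 1 - y
      let block := setStep3From2 (PySem.List.pyRepeat [x, y, 0] m)
        (PySem.List.slice pool (some (y + 1)) none)
      out ++ block) out) []

-- ===== PRECONDITION & SPEC =====
def Spec_Abg (Omega : Int) (out : List Int) : Prop := out = Abg_alt Omega
instance (Omega : Int) (out : List Int) : Decidable (Spec_Abg Omega out) := by unfold Spec_Abg; infer_instance

-- ===== CLAIM (what is proved, stated in full; the proofs are below) =====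
def Claim_equal_Abg : Prop := ∀ (Omega : Int), Dom_Abg Omega → Spec_Abg Omega (Abg Omega)

-- ===== LEMMAS AND PROOFS =====

-- slicing range(0, m) from a nonnegative index i is range(i, m)
theorem slice_pyRange_from (m i : Int) (hi : 0 ≤ i) :
    PySem.List.slice (PySem.List.pyRange 0 m 1) (some i) none = PySem.List.pyRange i m 1 := by
  rw [PySem.List.slice_from _ hi]
  by_cases h : i ≤ m
  · rw [PySem.List.pyRange_one_append 0 i m hi h]
    rw [List.drop_append_of_le_length (by simp [PySem.List.length_pyRange_one])]
    simp [List.drop_eq_nil_of_le, PySem.List.length_pyRange_one]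
  · rw [show PySem.List.pyRange i m 1 = [] from PySem.List.pyRange_one_eq_nil (by omega),
       List.drop_eq_nil_of_le (by simp [PySem.List.length_pyRange_one]; omega)]

-- indexing c = list(range(m)) at an in-range j gives j itself
theorem pyGetD_pyRange_self (m j : Int) (h0 : 0 ≤ j) (hm : j < m) :
    PySem.List.pyGetD (PySem.List.pyRange 0 m 1) j 0 = j := by
  have := PySem.List.pyGetD_map_pyRange_of_nonneg (fun x : Int => x) m j 0 h0 hm
  simpa using this

-- reindex a flatMap over a range by the d = k + 1 shift
theorem flatMap_pyRange_shift (a b : Int) (g : Int → List Int) :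
    List.flatMap (fun k => g (k + 1)) (PySem.List.pyRange a b 1)
      = List.flatMap g (PySem.List.pyRange (a + 1) (b + 1) 1) := by
  rw [PySem.List.pyRange_one a b, PySem.List.pyRange_one (a + 1) (b + 1)]
  have h : (b + 1 - (a + 1)).toNat = (b - a).toNat := by omega
  rw [h, List.flatMap_map, List.flatMap_map]
  exact List.flatMap_congr (fun k _ => by ring_nf)

-- A's loops as nested flatMaps, slices resolved and c[j] = j
theorem a_eq_flatMap (Omega : Int) :
    Abg Omega
      = List.flatMap (fun i =>
          List.flatMap (fun d =>
            List.flatMap (fun j => [i, d, j]) (PySem.List.pyRange (d + 1) Omega 1))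
            (PySem.List.pyRange (i + 1) Omega 1))
          (PySem.List.pyRange 0 (Omega - 1) 1) := by
  simp only [Abg, PySem.List.foldl_append_eq_flatMap, List.nil_append]
  refine List.flatMap_congr ?_
  intro i hi
  have hi0 : 0 ≤ i := (PySem.List.mem_pyRange_one.mp hi).1
  rw [slice_pyRange_from (Omega - 1) i hi0]
  have hcong : List.flatMap
      (fun k => List.flatMap (fun j => [i, k + 1, PySem.List.pyGetD (PySem.List.pyRange 0 Omega 1) j 0])
        (PySem.List.slice (PySem.List.pyRange 0 Omega 1) (some (k + 1 + 1)) none))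
      (PySem.List.pyRange i (Omega - 1) 1)
      = List.flatMap
      (fun k => (fun d => List.flatMap (fun j => [i, d, j]) (PySem.List.pyRange (d + 1) Omega 1)) (k + 1))
      (PySem.List.pyRange i (Omega - 1) 1) := by
    refine List.flatMap_congr ?_
    intro k hk
    have hk0 : 0 ≤ k := le_trans hi0 (PySem.List.mem_pyRange_one.mp hk).1
    rw [slice_pyRange_from Omega (k + 1 + 1) (by omega)]
    refine List.flatMap_congr ?_
    intro j hj
    have hj1 := PySem.List.mem_pyRange_one.mp hj
    rw [pyGetD_pyRange_self Omega j (by omega) hj1.2]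
  rw [hcong, flatMap_pyRange_shift i (Omega - 1)
      (fun d => List.flatMap (fun j => [i, d, j]) (PySem.List.pyRange (d + 1) Omega 1))]
  norm_num

-- filling every third slot of m copies of [x,y,0] with zs is the flattened triples
theorem setStep3From2_replicate (x y : Int) (k : Nat) (zs : List Int) (h : zs.length = k) :
    setStep3From2 ((List.replicate k [x, y, 0]).flatten) zs
      = List.flatMap (fun z => [x, y, z]) zs := by
  induction zs generalizing k with
  | nil => subst h; simp [setStep3From2]
  | cons z zs ih =>
    subst h
    simp only [List.length_cons, List.replicate_succ, List.flatten_cons]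
    simp only [List.cons_append, List.nil_append, setStep3From2, List.flatMap_cons]
    rw [ih _ rfl]

-- B's loops as the same nested flatMaps, over the full range(Omega)
theorem alt_eq_flatMap (Omega : Int) :
    Abg_alt Omega
      = List.flatMap (fun v1 =>
          List.flatMap (fun v2 =>
            List.flatMap (fun v3 => [v1, v2, v3]) (PySem.List.pyRange (v2 + 1) Omega 1))
            (PySem.List.pyRange (v1 + 1) Omega 1))
          (PySem.List.pyRange 0 Omega 1) := by
  simp only [Abg_alt, PySem.List.foldl_append_eq_flatMap, List.nil_append]
  refine List.flatMap_congr ?_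
  intro x hx
  have hbx := PySem.List.mem_pyRange_one.mp hx
  rw [slice_pyRange_from Omega (x + 1) (by omega)]
  refine List.flatMap_congr ?_
  intro y hy
  have hby := PySem.List.mem_pyRange_one.mp hy
  rw [slice_pyRange_from Omega (y + 1) (by omega)]
  rw [show PySem.List.pyRepeat [x, y, 0] (Omega - 1 - y)
      = (List.replicate (Omega - 1 - y).toNat [x, y, 0]).flatten from rfl]
  rw [setStep3From2_replicate x y (Omega - 1 - y).toNat _
      (by rw [PySem.List.length_pyRange_one]; omega)]

-- ===== VERDICT (by name: the statement is the Claim_ definition above) =====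
theorem Abg_spec : Claim_equal_Abg := by
  intro Omega _
  show Abg Omega = Abg_alt Omega
  rw [a_eq_flatMap, alt_eq_flatMap]
  by_cases h1 : 1 ≤ Omega
  · rw [show PySem.List.pyRange 0 Omega 1
        = PySem.List.pyRange 0 (Omega - 1) 1 ++ [Omega - 1] by
      have := PySem.List.pyRange_one_succ_right (a := 0) (b := Omega - 1) (by omega)
      simpa [sub_add_cancel] using this]
    rw [List.flatMap_append]
    simp
  · rw [show PySem.List.pyRange 0 (Omega - 1) 1 = [] from
        PySem.List.pyRange_one_eq_nil (by omega),
      show PySem.List.pyRange 0 Omega 1 = [] from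
        PySem.List.pyRange_one_eq_nil (by omega)]
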